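-- pv_equiv track=rewrite | github.com/alexander-belikov/datahelpers | datahelpers/community_tools.py | get_community_fnames_cnames
-- ===== SOURCE A (Python) =====
-- from itertools import product
--
-- def get_community_fnames_cnames(mode='lincs', storage_type='csv.gz'):
--
--     if storage_type != 'csv.gz':
--         suffix = '_dyn'
--     else:
--         suffix = ''
--
--     # arguments and column generator for lincs community detection methods
--     methods = ['multilevel', 'infomap']
--     directeds = [True, False]
--     weighteds = [True, False]
--     percentile_values = [None, 95]
--
--     if mode == 'lincs':
--         types = ['lincs']
--     elif mode[:2] == 'gw':
--         types = [mode]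
--     elif mode[:3] == 'lit':
--         types = [mode]
--     else:
--         types = [mode]
--
--     keys = ['method', 'directed']
--     keys2 = ['weighted', 'percentile_value']
--     largs = [{k: v for k, v in zip(keys, p)} for p in product(*(methods, directeds))]
--
--     zargs = [{k: v for k, v in zip(keys2, p)} for p in zip(*(weighteds, percentile_values))]
--     origins = [{'origin': '{0}'.format(t)} for t in types]
--
--     inv_args = {'fpath_out': '~/data/kl/comms/',
--                 'file_format': 'matrix'}
--     targs = [{**z, **l, **inv_args, **t} for l, z, t in product(largs, zargs, origins)]
--     targs2 = list(filter(lambda x: not (x['directed'] and x['method'] == 'multilevel'), targs))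
--
--     if mode == 'lincs':
--         #undirected infomap on full graph fails on 16Gb
--         targs2 = list(filter(lambda x:
--                              not (x['method'] == 'infomap' and x['directed'] is False
--                                   and not x['percentile_value']), targs2))
--
--     fnames = []
--     cnames = []
--     for aa in targs2:
--         directedness = 'dir' if aa['directed'] else 'undir'
--         weighted = 'wei' if aa['weighted'] else 'unwei'
--         percentile_value = aa['percentile_value']
--         mname = 'im' if aa['method'] == 'infomap' else 'ml'
--         fout_name = '{0}_comm_{1}_{2}_{3}_p{4}.{5}'.format(aa['origin'], aa['method'],
--                                                            directedness, weighted,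
--                                                            percentile_value, storage_type)
--         cname_full = '{0}_comm_{1}_{2}_{3}_p{4}{5}'.format(aa['origin'], mname, directedness,
--                                                            weighted, percentile_value, suffix)
--
--         fnames.append(fout_name)
--         cnames.append(cname_full)
--     return fnames, cnames
-- ===== SOURCE B (Python) =====
-- # Table-driven: the surviving combinations are a fixed 6-row table (mode=='lincs'
-- # additionally drops row 4); names are produced by two maps over the table.
-- _ROWS = [
--     ('multilevel', 'ml', 'undir', 'wei', 'None'),
--     ('multilevel', 'ml', 'undir', 'unwei', '95'),
--     ('infomap', 'im', 'dir', 'wei', 'None'),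
--     ('infomap', 'im', 'dir', 'unwei', '95'),
--     ('infomap', 'im', 'undir', 'wei', 'None'),
--     ('infomap', 'im', 'undir', 'unwei', '95'),
-- ]
--
-- def get_community_fnames_cnames(mode='lincs', storage_type='csv.gz'):
--     suffix = '' if storage_type == 'csv.gz' else '_dyn'
--     rows = [r for i, r in enumerate(_ROWS) if not (mode == 'lincs' and i == 4)]
--     fnames = ['{}_comm_{}_{}_{}_p{}.{}'.format(mode, m, d, w, p, storage_type)
--               for m, _, d, w, p in rows]
--     cnames = ['{}_comm_{}_{}_{}_p{}{}'.format(mode, mn, d, w, p, suffix)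
--               for _, mn, d, w, p in rows]
--     return fnames, cnames
-- ===== Notes on version B (the rewrite author's own statement) =====
-- stated objective: simpler
-- what changed: Replaced the product/dict-merge/double-filter enumeration of the parameter space with a precomputed static 6-row table of surviving combinations (mode=='lincs' drops one row by index) and two plain maps that format the names from the table rows.
import Mathlib
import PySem

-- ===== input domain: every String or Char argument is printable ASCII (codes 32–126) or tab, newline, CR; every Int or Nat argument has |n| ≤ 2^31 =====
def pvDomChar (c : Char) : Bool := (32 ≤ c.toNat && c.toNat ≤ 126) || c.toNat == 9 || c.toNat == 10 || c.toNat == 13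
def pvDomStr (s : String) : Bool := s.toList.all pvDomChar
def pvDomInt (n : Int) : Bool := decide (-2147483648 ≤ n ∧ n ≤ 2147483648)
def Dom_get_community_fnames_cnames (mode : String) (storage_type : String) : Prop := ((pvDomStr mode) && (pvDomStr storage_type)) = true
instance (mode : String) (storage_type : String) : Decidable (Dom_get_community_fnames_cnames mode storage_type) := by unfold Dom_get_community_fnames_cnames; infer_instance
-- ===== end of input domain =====

-- B replaces A's product/dict-merge/double-filter machinery with a precomputed static table
-- of the surviving combinations and two maps formatting the names (objective: simpler).

-- ===== PORT A =====
-- Python value stored in A's heterogeneous dicts (str / bool / int / None).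
inductive PyVal where
  | vs : String → PyVal
  | vb : Bool → PyVal
  | vi : Int → PyVal
  | vnone : PyVal
deriving DecidableEq, Repr

-- Python truthiness of such a value.
def pyTruthy : PyVal → Bool
  | .vs s => !(s == "")
  | .vb b => b
  | .vi n => !(n == 0)
  | .vnone => false

-- str() of such a value (as used by ''.format).
def pyStr : PyVal → String
  | .vs s => s
  | .vb b => if b then "True" else "False"
  | .vi n => PySem.Int.toStr n
  | .vnone => "None"

-- {**a-so-far, **d}: insert d's items in order.
def dictMerge (a d : PySem.Dict String PyVal) : PySem.Dict String PyVal :=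
  d.items.foldl (fun acc kv => acc.insert kv.1 kv.2) a

def get_community_fnames_cnames (mode : String) (storage_type : String) : List String × List String :=
  let suffix := if storage_type != "csv.gz" then "_dyn" else ""
  let methods := ["multilevel", "infomap"]
  let directeds := [true, false]
  let weighteds := [true, false]
  let percentile_values : List PyVal := [.vnone, .vi 95]
  let types :=
    if mode == "lincs" then ["lincs"]
    else if PySem.Str.slice mode none (some 2) == "gw" then [mode]
    else if PySem.Str.slice mode none (some 3) == "lit" then [mode]
    else [mode]
  let keys := ["method", "directed"]
  let keys2 := ["weighted", "percentile_value"]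
  let largs : List (PySem.Dict String PyVal) :=
    (methods.flatMap (fun m => directeds.map (fun d => (m, d)))).map
      (fun p => (keys.zip [PyVal.vs p.1, PyVal.vb p.2]).foldl
        (fun d kv => d.insert kv.1 kv.2) PySem.Dict.empty)
  let zargs : List (PySem.Dict String PyVal) :=
    (weighteds.zip percentile_values).map
      (fun p => (keys2.zip [PyVal.vb p.1, p.2]).foldl
        (fun d kv => d.insert kv.1 kv.2) PySem.Dict.empty)
  let origins : List (PySem.Dict String PyVal) :=
    types.map (fun t => PySem.Dict.empty.insert "origin" (.vs t))
  let inv_args : PySem.Dict String PyVal :=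
    (PySem.Dict.empty.insert "fpath_out" (.vs "~/data/kl/comms/")).insert "file_format" (.vs "matrix")
  let targs : List (PySem.Dict String PyVal) :=
    largs.flatMap (fun l => zargs.flatMap (fun z => origins.map (fun t =>
      dictMerge (dictMerge (dictMerge z l) inv_args) t)))
  let targs2 := targs.filter (fun x =>
    !(pyTruthy (x.getD "directed" .vnone) && (x.getD "method" .vnone == PyVal.vs "multilevel")))
  let targs2 :=
    if mode == "lincs" then
      targs2.filter (fun x =>
        !((x.getD "method" .vnone == PyVal.vs "infomap")
          && (x.getD "directed" .vnone == PyVal.vb false)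
          && !(pyTruthy (x.getD "percentile_value" .vnone))))
    else targs2
  targs2.foldl (fun (acc : List String × List String) aa =>
    let directedness := if pyTruthy (aa.getD "directed" .vnone) then "dir" else "undir"
    let weighted := if pyTruthy (aa.getD "weighted" .vnone) then "wei" else "unwei"
    let percentile_value := aa.getD "percentile_value" .vnone
    let mname := if aa.getD "method" .vnone == PyVal.vs "infomap" then "im" else "ml"
    let fout_name := pyStr (aa.getD "origin" .vnone) ++ "_comm_" ++ pyStr (aa.getD "method" .vnone)
      ++ "_" ++ directedness ++ "_" ++ weighted ++ "_p" ++ pyStr percentile_value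
      ++ "." ++ storage_type
    let cname_full := pyStr (aa.getD "origin" .vnone) ++ "_comm_" ++ mname
      ++ "_" ++ directedness ++ "_" ++ weighted ++ "_p" ++ pyStr percentile_value ++ suffix
    (acc.1 ++ [fout_name], acc.2 ++ [cname_full])) ([], [])

-- ===== PORT B =====
-- the static table _ROWS: (method, mname, directedness, weighted, percentile) already as strings
def pvRows : List (String × String × String × String × String) :=
  [("multilevel", "ml", "undir", "wei", "None"),
   ("multilevel", "ml", "undir", "unwei", "95"),
   ("infomap", "im", "dir", "wei", "None"),
   ("infomap", "im", "dir", "unwei", "95"),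
   ("infomap", "im", "undir", "wei", "None"),
   ("infomap", "im", "undir", "unwei", "95")]

def get_community_fnames_cnames_alt (mode : String) (storage_type : String) : List String × List String :=
  let suffix := if storage_type == "csv.gz" then "" else "_dyn"
  let rows := ((PySem.List.enumerate pvRows).filter
    (fun ir => !(mode == "lincs" && ir.1 == (4 : Int)))).map Prod.snd
  let fnames := rows.map (fun r =>
    mode ++ "_comm_" ++ r.1 ++ "_" ++ r.2.2.1 ++ "_" ++ r.2.2.2.1 ++ "_p" ++ r.2.2.2.2
      ++ "." ++ storage_type)
  let cnames := rows.map (fun r =>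
    mode ++ "_comm_" ++ r.2.1 ++ "_" ++ r.2.2.1 ++ "_" ++ r.2.2.2.1 ++ "_p" ++ r.2.2.2.2 ++ suffix)
  (fnames, cnames)

-- ===== PRECONDITION & SPEC =====
def Spec_get_community_fnames_cnames (mode : String) (storage_type : String) (out : List String × List String) : Prop := out = get_community_fnames_cnames_alt mode storage_type
instance (mode : String) (storage_type : String) (out : List String × List String) : Decidable (Spec_get_community_fnames_cnames mode storage_type out) := by unfold Spec_get_community_fnames_cnames; infer_instance

-- ===== CLAIM (what is proved, stated in full; the proofs are below) =====
def Claim_equal_get_community_fnames_cnames : Prop := ∀ (mode : String) (storage_type : String), Dom_get_community_fnames_cnames mode storage_type → Spec_get_community_fnames_cnames mode storage_type (get_community_fnames_cnames mode storage_type)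

-- ===== LEMMAS AND PROOFS =====
theorem pyval_beq_vs (a b : String) : (PyVal.vs a == PyVal.vs b) = (a == b) := by
  simp [beq_eq_decide]

theorem pyval_beq_vb (a b : Bool) : (PyVal.vb a == PyVal.vb b) = (a == b) := by
  simp [beq_eq_decide]

theorem toStr95 : PySem.Int.toStr 95 = "95" := by decide

-- ===== VERDICT (by name: the statement is the Claim_ definition above) =====
theorem get_community_fnames_cnames_spec : Claim_equal_get_community_fnames_cnames := by
  intro mode storage_type _
  unfold Spec_get_community_fnames_cnames
  unfold get_community_fnames_cnames get_community_fnames_cnames_alt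
  by_cases hm : mode = "lincs"
  · by_cases hs : storage_type = "csv.gz" <;>
      simp [hm, hs, beq_iff_eq, pyval_beq_vs, pyval_beq_vb, dictMerge, pyTruthy, pyStr, toStr95,
        pvRows, PySem.List.enumerate, PySem.Dict.insert, PySem.Dict.getD, PySem.Dict.get?,
        PySem.Dict.empty, List.filter, List.find?, List.foldl]
  · have hm' : (mode == "lincs") = false := beq_eq_false_iff_ne.mpr hm
    by_cases hs : storage_type = "csv.gz" <;>
      simp [hm', hs, beq_iff_eq, pyval_beq_vs, dictMerge, pyTruthy, pyStr, toStr95,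
        pvRows, PySem.List.enumerate, PySem.Dict.insert, PySem.Dict.getD, PySem.Dict.get?,
        PySem.Dict.empty, List.filter, List.find?, List.foldl]
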